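-- pv_equiv track=rewrite | github.com/microsoft/webgym | analysis/visualize_results.py | aggregate_samples_by_difficulty_group
-- ===== SOURCE A (Python) =====
-- def get_difficulty_group(diff):
--     """Map individual difficulty (1-7+) to group (easy/medium/hard)"""
--     if diff <= 3:
--         return 'easy'
--     elif diff <= 6:
--         return 'medium'
--     else:
--         return 'hard'
--
-- def aggregate_samples_by_difficulty_group(samples_by_diff_dict):
--     """
--     Aggregate sample counts by difficulty group (sum instead of average).
--     """
--     if not samples_by_diff_dict:
--         return {}
--
--     n_iterations = max(len(v) for v in samples_by_diff_dict.values()) if samples_by_diff_dict else 0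
--
--     result = {'easy': [], 'medium': [], 'hard': []}
--
--     for iter_idx in range(n_iterations):
--         for group in ['easy', 'medium', 'hard']:
--             total = 0
--             for diff, counts in samples_by_diff_dict.items():
--                 if get_difficulty_group(diff) == group and iter_idx < len(counts):
--                     total += counts[iter_idx] if counts[iter_idx] else 0
--             result[group].append(total)
--
--     return result
-- ===== SOURCE B (Python) =====
-- def get_difficulty_group(diff):
--     """Map individual difficulty (1-7+) to group (easy/medium/hard)"""
--     if diff <= 3:
--         return 'easy'
--     elif diff <= 6:
--         return 'medium'
--     else:
--         return 'hard'
--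
-- def aggregate_samples_by_difficulty_group(samples_by_diff_dict):
--     """Sum sample counts per iteration by difficulty group (single pass per iteration)."""
--     if not samples_by_diff_dict:
--         return {}
--
--     # classify each difficulty once
--     items = [(get_difficulty_group(diff), counts)
--              for diff, counts in samples_by_diff_dict.items()]
--
--     n_iterations = max(len(counts) for _, counts in items)
--
--     easy, medium, hard = [], [], []
--     for iter_idx in range(n_iterations):
--         te = tm = th = 0
--         for group, counts in items:
--             if iter_idx < len(counts):
--                 v = counts[iter_idx] or 0
--                 if group == 'easy':
--                     te += v
--                 elif group == 'medium':
--                     tm += v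
--                 else:
--                     th += v
--         easy.append(te)
--         medium.append(tm)
--         hard.append(th)
--
--     return {'easy': easy, 'medium': medium, 'hard': hard}
-- ===== Notes on version B (the rewrite author's own statement) =====
-- stated objective: alternative
-- what changed: Each difficulty is classified once up front and each iteration makes a single pass over the items accumulating three running totals, instead of A's three group-filtered rescans of the whole dict per iteration.
import Mathlib
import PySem

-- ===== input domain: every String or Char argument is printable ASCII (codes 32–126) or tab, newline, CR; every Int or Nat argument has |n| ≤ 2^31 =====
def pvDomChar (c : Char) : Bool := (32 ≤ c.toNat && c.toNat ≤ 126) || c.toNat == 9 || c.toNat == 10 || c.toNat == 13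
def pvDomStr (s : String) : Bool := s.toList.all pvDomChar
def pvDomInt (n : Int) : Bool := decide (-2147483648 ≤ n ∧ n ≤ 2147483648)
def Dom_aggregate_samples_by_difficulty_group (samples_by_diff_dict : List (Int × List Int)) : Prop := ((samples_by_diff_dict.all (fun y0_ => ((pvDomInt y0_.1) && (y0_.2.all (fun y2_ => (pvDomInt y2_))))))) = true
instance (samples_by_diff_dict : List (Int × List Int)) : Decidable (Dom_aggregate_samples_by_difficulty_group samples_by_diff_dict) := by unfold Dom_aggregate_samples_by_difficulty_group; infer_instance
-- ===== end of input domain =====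

-- B classifies each difficulty once and sums all three groups in a single pass per
-- iteration, instead of A's three group-filtered rescans of the whole dict; same results.

-- ===== PORT A =====
def get_difficulty_group (diff : Int) : String :=
  if diff ≤ 3 then "easy" else if diff ≤ 6 then "medium" else "hard"

-- the inner `total` loop of A: scan all items, keep only those of `group` with iter_idx in range
def pvA_total (samples_by_diff_dict : List (Int × List Int)) (iter_idx : Int) (group : String) : Int :=
  samples_by_diff_dict.foldl (fun total dc =>
    if get_difficulty_group dc.1 = group ∧ iter_idx < (dc.2.length : Int) then
      -- counts[iter_idx]: index is in range here, so pyGetD is exact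
      total + (let c := PySem.List.pyGetD dc.2 iter_idx 0; if c ≠ 0 then c else 0)
    else total) 0

def aggregate_samples_by_difficulty_group (samples_by_diff_dict : List (Int × List Int)) : List (String × List Int) :=
  if samples_by_diff_dict = [] then []
  else
    -- max(...) is applied to a nonempty list here, so getD 0 never fires
    let n_iterations : Int :=
      (PySem.List.max? (samples_by_diff_dict.map (fun v => (v.2.length : Int))) (fun x => x)).getD 0
    let result : PySem.Dict String (List Int) := PySem.Dict.mk [("easy", []), ("medium", []), ("hard", [])]
    ((PySem.List.pyRange 0 n_iterations 1).foldl (fun result iter_idx =>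
      ["easy", "medium", "hard"].foldl (fun result group =>
        PySem.Dict.modify result group [] (fun l => l ++ [pvA_total samples_by_diff_dict iter_idx group]))
        result) result).items

-- ===== PORT B =====
-- one pass over the classified items, accumulating the (easy, medium, hard) totals
def pvB_step (items : List (String × List Int)) (iter_idx : Int) : Int × Int × Int :=
  items.foldl (fun t gc =>
    if iter_idx < (gc.2.length : Int) then
      let v := PySem.List.pyGetD gc.2 iter_idx 0  -- index in range here: exact
      let v := if v = 0 then 0 else v             -- `counts[iter_idx] or 0`
      if gc.1 = "easy" then (t.1 + v, t.2.1, t.2.2)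
      else if gc.1 = "medium" then (t.1, t.2.1 + v, t.2.2)
      else (t.1, t.2.1, t.2.2 + v)
    else t) (0, 0, 0)

def aggregate_samples_by_difficulty_group_alt (samples_by_diff_dict : List (Int × List Int)) : List (String × List Int) :=
  if samples_by_diff_dict = [] then []
  else
    let items := samples_by_diff_dict.map (fun p => (get_difficulty_group p.1, p.2))
    let n_iterations : Int :=
      (PySem.List.max? (items.map (fun gc => (gc.2.length : Int))) (fun x => x)).getD 0
    let res := (PySem.List.pyRange 0 n_iterations 1).foldl (fun acc iter_idx =>
      let t := pvB_step items iter_idx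
      (acc.1 ++ [t.1], acc.2.1 ++ [t.2.1], acc.2.2 ++ [t.2.2])) ([], [], [])
    [("easy", res.1), ("medium", res.2.1), ("hard", res.2.2)]

-- ===== PRECONDITION & SPEC =====
def Spec_aggregate_samples_by_difficulty_group (samples_by_diff_dict : List (Int × List Int)) (out : List (String × List Int)) : Prop := out = aggregate_samples_by_difficulty_group_alt samples_by_diff_dict
instance (samples_by_diff_dict : List (Int × List Int)) (out : List (String × List Int)) : Decidable (Spec_aggregate_samples_by_difficulty_group samples_by_diff_dict out) := by unfold Spec_aggregate_samples_by_difficulty_group; infer_instance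

-- ===== CLAIM (what is proved, stated in full; the proofs are below) =====
def Claim_equal_aggregate_samples_by_difficulty_group : Prop := ∀ (samples_by_diff_dict : List (Int × List Int)), Dom_aggregate_samples_by_difficulty_group samples_by_diff_dict → Spec_aggregate_samples_by_difficulty_group samples_by_diff_dict (aggregate_samples_by_difficulty_group samples_by_diff_dict)

-- ===== LEMMAS AND PROOFS =====

-- a foldl whose step is a shift by a fixed increment factors through accumulator 0
theorem pv_foldl_shift {M α : Type} [AddCommMonoid M] (f : M → α → M)
    (hf : ∀ t x, f t x = t + f 0 x) (l : List α) : ∀ t : M, l.foldl f t = t + l.foldl f 0 := by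
  induction l with
  | nil => intro t; simp
  | cons x l ih =>
    intro t
    simp only [List.foldl_cons]
    rw [ih (f t x), ih (f 0 x), hf t x, add_assoc]

theorem pvA_total_cons (x : Int × List Int) (rest : List (Int × List Int)) (i : Int) (g : String) :
    pvA_total (x :: rest) i g
    = (if get_difficulty_group x.1 = g ∧ i < (x.2.length : Int) then
        (let c := PySem.List.pyGetD x.2 i 0; if c ≠ 0 then c else 0) else 0)
      + pvA_total rest i g := by
  have hf : ∀ (t : Int) (dc : Int × List Int),
      (fun total dc =>
        if get_difficulty_group dc.1 = g ∧ i < (dc.2.length : Int) then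
          total + (let c := PySem.List.pyGetD dc.2 i 0; if c ≠ 0 then c else 0)
        else total) t dc
      = t + (fun total dc =>
        if get_difficulty_group dc.1 = g ∧ i < (dc.2.length : Int) then
          total + (let c := PySem.List.pyGetD dc.2 i 0; if c ≠ 0 then c else 0)
        else total) 0 dc := by
    intro t dc; dsimp only; split_ifs <;> ring
  simp only [pvA_total, List.foldl_cons]
  rw [pv_foldl_shift _ hf]
  dsimp only
  split_ifs <;> ring

theorem pvB_step_cons (y : String × List Int) (items : List (String × List Int)) (i : Int) :
    pvB_step (y :: items) i
    = (if i < (y.2.length : Int) then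
        let v := PySem.List.pyGetD y.2 i 0
        let v := if v = 0 then 0 else v
        if y.1 = "easy" then ((v : Int), (0 : Int), (0 : Int))
        else if y.1 = "medium" then (0, v, 0)
        else (0, 0, v)
      else (0, 0, 0))
      + pvB_step items i := by
  have hf : ∀ (t : Int × Int × Int) (gc : String × List Int),
      (fun t (gc : String × List Int) =>
        if i < (gc.2.length : Int) then
          let v := PySem.List.pyGetD gc.2 i 0
          let v := if v = 0 then 0 else v
          if gc.1 = "easy" then (t.1 + v, t.2.1, t.2.2)
          else if gc.1 = "medium" then (t.1, t.2.1 + v, t.2.2)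
          else (t.1, t.2.1, t.2.2 + v)
        else t) t gc
      = t + (fun t (gc : String × List Int) =>
        if i < (gc.2.length : Int) then
          let v := PySem.List.pyGetD gc.2 i 0
          let v := if v = 0 then 0 else v
          if gc.1 = "easy" then (t.1 + v, t.2.1, t.2.2)
          else if gc.1 = "medium" then (t.1, t.2.1 + v, t.2.2)
          else (t.1, t.2.1, t.2.2 + v)
        else t) 0 gc := by
    intro t gc; dsimp only; split_ifs <;>
      simp [Prod.ext_iff, Prod.fst_add, Prod.snd_add]
  simp only [pvB_step, List.foldl_cons]
  rw [pv_foldl_shift _ hf]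
  dsimp only
  split_ifs <;> simp [Prod.mk_zero_zero]

theorem pvB_step_eq (d : List (Int × List Int)) (i : Int) :
    pvB_step (d.map (fun p => (get_difficulty_group p.1, p.2))) i
    = (pvA_total d i "easy", pvA_total d i "medium", pvA_total d i "hard") := by
  induction d with
  | nil => simp [pvB_step, pvA_total]
  | cons x rest ih =>
    simp only [List.map_cons]
    rw [pvB_step_cons, ih,
        pvA_total_cons x rest i "easy", pvA_total_cons x rest i "medium",
        pvA_total_cons x rest i "hard"]
    have hemh : (("easy" : String) ≠ "medium") ∧ (("easy" : String) ≠ "hard") ∧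
        (("medium" : String) ≠ "easy") ∧ (("medium" : String) ≠ "hard") ∧
        (("hard" : String) ≠ "easy") ∧ (("hard" : String) ≠ "medium") := by decide
    obtain ⟨h1, h2, h3', h4, h5, h6⟩ := hemh
    by_cases hl : i < ((x.2.length : Int))
    · by_cases h3 : x.1 ≤ 3
      · have hg : get_difficulty_group x.1 = "easy" := by simp [get_difficulty_group, h3]
        simp [hg, hl, h1, h2]
      · by_cases h6' : x.1 ≤ 6
        · have hg : get_difficulty_group x.1 = "medium" := by
            simp [get_difficulty_group, h3, h6']
          simp [hg, hl, h3', h4]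
        · have hg : get_difficulty_group x.1 = "hard" := by
            simp [get_difficulty_group, h3, h6']
          simp [hg, hl, h5, h6]
    · simp [hl]

-- one step of A's range loop on the three-key dict
theorem pvA_dict_step (d : List (Int × List Int)) (i : Int) (e m h : List Int) :
    ["easy", "medium", "hard"].foldl (fun result group =>
        PySem.Dict.modify result group [] (fun l => l ++ [pvA_total d i group]))
      (PySem.Dict.mk [("easy", e), ("medium", m), ("hard", h)])
    = PySem.Dict.mk [("easy", e ++ [pvA_total d i "easy"]),
        ("medium", m ++ [pvA_total d i "medium"]),
        ("hard", h ++ [pvA_total d i "hard"])] := by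
  simp [List.foldl, PySem.Dict.modify, PySem.Dict.insert, PySem.Dict.get?,
        PySem.Dict.contains, PySem.Dict.getD]

-- A's whole range loop, by induction over an arbitrary index list
theorem pvA_loop (d : List (Int × List Int)) (R : List Int) (e m h : List Int) :
    R.foldl (fun result iter_idx =>
      ["easy", "medium", "hard"].foldl (fun result group =>
        PySem.Dict.modify result group [] (fun l => l ++ [pvA_total d iter_idx group])) result)
      (PySem.Dict.mk [("easy", e), ("medium", m), ("hard", h)])
    = PySem.Dict.mk [("easy", e ++ R.map (fun i => pvA_total d i "easy")),
       ("medium", m ++ R.map (fun i => pvA_total d i "medium")),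
       ("hard", h ++ R.map (fun i => pvA_total d i "hard"))] := by
  induction R generalizing e m h with
  | nil => simp
  | cons i R ih =>
    rw [List.foldl_cons, pvA_dict_step, ih]
    simp

-- B's whole range loop
theorem pvB_loop (items : List (String × List Int)) (R : List Int) (e m h : List Int) :
    R.foldl (fun acc iter_idx =>
      let t := pvB_step items iter_idx
      (acc.1 ++ [t.1], acc.2.1 ++ [t.2.1], acc.2.2 ++ [t.2.2])) (e, m, h)
    = (e ++ R.map (fun i => (pvB_step items i).1),
       m ++ R.map (fun i => (pvB_step items i).2.1),
       h ++ R.map (fun i => (pvB_step items i).2.2)) := by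
  induction R generalizing e m h with
  | nil => simp
  | cons i R ih =>
    simp only [List.foldl_cons, ih, List.map_cons]
    simp

-- ===== VERDICT (by name: the statement is the Claim_ definition above) =====
theorem aggregate_samples_by_difficulty_group_spec : Claim_equal_aggregate_samples_by_difficulty_group := by
  intro d _
  unfold Spec_aggregate_samples_by_difficulty_group
  unfold aggregate_samples_by_difficulty_group aggregate_samples_by_difficulty_group_alt
  by_cases hd : d = []
  · simp [hd]
  · simp only [if_neg hd]
    have hn : ((d.map (fun p => (get_difficulty_group p.1, p.2))).map (fun gc => ((gc.2.length : Int))))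
            = d.map (fun v => ((v.2.length : Int))) := by
      simp [List.map_map]
    rw [hn, pvA_loop, pvB_loop]
    simp only [pvB_step_eq]
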